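-- pv_equiv track=rewrite | github.com/daniel-reich/ubiquitous-fiesta | 4s9kNQFfk4D4Lbm4q_7.py | ABA
-- ===== SOURCE A (Python) =====
-- def ABA(s):
--   alphabets = 'ABCDEFGHIJKLMNOPQRSTUVWXYZ'
--   index_s = alphabets.index(s)
--   n = ''
--   u = ''
--   if s == 'A':
--     return s
--   else:
--     for i in range(index_s+1):
--       if alphabets[i] == 'A':
--         n = 'A'
--       else:
--         u = n[:]
--         n = n[:] + alphabets[i] + u
--     return n
-- ===== SOURCE B (Python) =====
-- def ABA(s):
--   alphabets = 'ABCDEFGHIJKLMNOPQRSTUVWXYZ'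
--   index_s = alphabets.index(s)  # same ValueError as A for bad input
--   def go(i):
--     if i == 0:
--       return 'A'
--     prev = go(i - 1)
--     return prev + alphabets[i] + prev
--   return go(index_s)
-- ===== Notes on version B (the rewrite author's own statement) =====
-- stated objective: alternative
-- what changed: Replaces the accumulating for-loop over alphabet positions (with its n/u string pair and the s=='A' special case) by a direct structural recursion on the alphabet index realizing the doubling recurrence ABA(i) = ABA(i-1) + letter(i) + ABA(i-1).
import Mathlib
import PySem

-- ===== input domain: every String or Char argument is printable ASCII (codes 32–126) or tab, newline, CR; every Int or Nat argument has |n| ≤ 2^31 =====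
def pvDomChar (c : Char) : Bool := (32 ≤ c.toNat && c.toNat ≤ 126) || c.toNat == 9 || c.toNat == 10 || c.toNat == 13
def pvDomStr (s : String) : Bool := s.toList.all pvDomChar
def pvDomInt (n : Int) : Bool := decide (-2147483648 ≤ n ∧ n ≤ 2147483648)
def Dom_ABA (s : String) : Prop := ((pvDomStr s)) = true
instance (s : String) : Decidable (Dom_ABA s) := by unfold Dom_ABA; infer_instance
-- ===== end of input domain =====

-- B replaces A's accumulating loop by a structural recursion on the alphabet index (no speed claim).

-- ===== PORT A =====
-- one loop iteration of A's for-loop: state (n, u)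
def abaStep (st : List Char × List Char) (i : Int) : List Char × List Char :=
  if PySem.List.pyGetD "ABCDEFGHIJKLMNOPQRSTUVWXYZ".toList i ' ' == 'A' then (['A'], st.2)
  else (st.1 ++ [PySem.List.pyGetD "ABCDEFGHIJKLMNOPQRSTUVWXYZ".toList i ' '] ++ st.1, st.1)

def ABA (s : String) : String :=
  let index_s : Int := PySem.Str.find "ABCDEFGHIJKLMNOPQRSTUVWXYZ" s
  if s == "A" then s
  else
    let st := (PySem.List.pyRange 0 (index_s + 1) 1).foldl abaStep ([], [])
    String.mk st.1

-- ===== PORT B =====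
-- the inner recursive go(i) of B, closing over the alphabet
def abaGo (alphabets : List Char) : Nat → List Char
  | 0 => ['A']
  | i + 1 =>
    let prev := abaGo alphabets i
    prev ++ [PySem.List.pyGetD alphabets ((i : Int) + 1) 'A'] ++ prev

def ABA_alt (s : String) : String :=
  let index_s : Int := PySem.Str.find "ABCDEFGHIJKLMNOPQRSTUVWXYZ" s
  String.mk (abaGo "ABCDEFGHIJKLMNOPQRSTUVWXYZ".toList index_s.toNat)

-- ===== PRECONDITION & SPEC =====
-- Pre_ excludes exactly the inputs where alphabets.index(s) raises ValueError in both A and B: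
-- s must be a substring of the 26-letter uppercase alphabet.
def Pre_ABA (s : String) : Prop := PySem.Str.isIn s "ABCDEFGHIJKLMNOPQRSTUVWXYZ" = true
instance (s : String) : Decidable (Pre_ABA s) := by unfold Pre_ABA; infer_instance
def pvWitness_ABA : String := "C"

def Spec_ABA (s : String) (out : String) : Prop := out = ABA_alt s
instance (s : String) (out : String) : Decidable (Spec_ABA s out) := by unfold Spec_ABA; infer_instance

-- ===== CLAIM (what is proved, stated in full; the proofs are below) =====
def Claim_equal_ABA : Prop := ∀ (s : String), Dom_ABA s → Pre_ABA s → Spec_ABA s (ABA s)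

-- ===== LEMMAS AND PROOFS =====

-- letters at positions 1..25 are not 'A', and getD there ignores the default
lemma aba_alpha_ne : ∀ j < 26, 1 ≤ j →
    ("ABCDEFGHIJKLMNOPQRSTUVWXYZ".toList.getD j ' ' ≠ 'A' ∧
     "ABCDEFGHIJKLMNOPQRSTUVWXYZ".toList.getD j ' ' = "ABCDEFGHIJKLMNOPQRSTUVWXYZ".toList.getD j 'A') := by
  decide

-- invariant of A's loop: after iterations 0..k the pair is (abaGo k, previous abaGo)
lemma aba_loop_eq : ∀ k : Nat, k ≤ 25 →
    (PySem.List.pyRange 0 ((k : Int) + 1) 1).foldl abaStep ([], []) =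
      (abaGo "ABCDEFGHIJKLMNOPQRSTUVWXYZ".toList k,
       if k = 0 then [] else abaGo "ABCDEFGHIJKLMNOPQRSTUVWXYZ".toList (k - 1)) := by
  intro k
  induction k with
  | zero => intro _; decide
  | succ n ih =>
    intro hk
    have hsplit : PySem.List.pyRange 0 ((↑(n + 1) : Int) + 1) 1 =
        PySem.List.pyRange 0 ((n : Int) + 1) 1 ++ [((n : Int) + 1)] := by
      have := PySem.List.pyRange_one_succ_right (a := 0) (b := (n : Int) + 1) (by omega)
      push_cast
      push_cast at this
      convert this using 2
    rw [hsplit, List.foldl_append, ih (by omega)]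
    have h26 : n + 1 < 26 := by omega
    have hne := aba_alpha_ne (n + 1) h26 (by omega)
    have hcast : ((n : Int) + 1) = ((n + 1 : Nat) : Int) := by push_cast; ring
    simp only [List.foldl, abaStep, hcast, PySem.List.pyGetD_natCast]
    rw [if_neg (by simpa using hne.1)]
    refine Prod.ext ?_ ?_
    · simp only [abaGo, hcast, PySem.List.pyGetD_natCast]
      rw [← hne.2]
    · simp

-- under Pre_, the found index is in [0, 25]
lemma aba_find_bounds (s : String) (h : Pre_ABA s) :
    0 ≤ PySem.Str.find "ABCDEFGHIJKLMNOPQRSTUVWXYZ" s ∧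
    PySem.Str.find "ABCDEFGHIJKLMNOPQRSTUVWXYZ" s ≤ 25 := by
  have hnn : 0 ≤ PySem.Str.find "ABCDEFGHIJKLMNOPQRSTUVWXYZ" s := by
    exact (PySem.Str.find_nonneg_iff _ _).mpr
      ((PySem.Str.isIn_iff_infix _ _).mp (show PySem.Str.isIn s "ABCDEFGHIJKLMNOPQRSTUVWXYZ" = true from h))
  refine ⟨hnn, ?_⟩
  have hle : PySem.Chars.find "ABCDEFGHIJKLMNOPQRSTUVWXYZ".toList s.toList ≤ 26 := by
    simpa using PySem.Chars.find_le_length "ABCDEFGHIJKLMNOPQRSTUVWXYZ".toList s.toList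
  have hfind : PySem.Str.find "ABCDEFGHIJKLMNOPQRSTUVWXYZ" s =
      PySem.Chars.find "ABCDEFGHIJKLMNOPQRSTUVWXYZ".toList s.toList := by
    simp [PySem.Str.find_eq]
  by_contra hgt
  push_neg at hgt
  have h26 : PySem.Chars.find "ABCDEFGHIJKLMNOPQRSTUVWXYZ".toList s.toList = 26 := by omega
  have hspec := PySem.Chars.find_spec (s := "ABCDEFGHIJKLMNOPQRSTUVWXYZ".toList)
      (sub := s.toList) (by omega)
  rw [h26] at hspec
  have hnil : s.toList = [] := by
    have := hspec.1
    simpa using this.length_le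
  rw [hnil] at h26
  simp [PySem.Chars.find_nil] at h26

-- ===== VERDICT (by name: the statement is the Claim_ definition above) =====
theorem ABA_spec : Claim_equal_ABA := by
  intro s _ hpre
  unfold Spec_ABA
  by_cases hA : s = "A"
  · subst hA; decide
  · obtain ⟨h0, h25⟩ := aba_find_bounds s hpre
    set f := PySem.Str.find "ABCDEFGHIJKLMNOPQRSTUVWXYZ" s with hf
    have hbeq : (s == "A") = false := by simp [hA]
    have hcast : f = ((f.toNat : Nat) : Int) := (Int.toNat_of_nonneg h0).symm
    have hk25 : f.toNat ≤ 25 := by omega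
    show ABA s = ABA_alt s
    unfold ABA ABA_alt
    rw [← hf, hbeq]
    simp only [Bool.false_eq_true, if_false]
    rw [hcast, aba_loop_eq f.toNat hk25]
    simp only [Int.toNat_natCast]
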